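-- pv_equiv track=rewrite | github.com/QI1002/exampool | Cracking_the_Coding_Interview/6-6.py | dooropen
-- ===== SOURCE A (Python) =====
-- def dooropen(n):
--     doors = []
--     for i in range(n+1):
--         doors.append(1)
--     for i in range(1,n+1,1):
--         for j in range(i,n+1,i):
--             doors[j] = 1 - doors[j]
--
--     return doors
-- ===== SOURCE B (Python) =====
-- def dooropen(n):
--     # Each door is toggled once per divisor of its number, so exactly the doors at
--     # perfect-square indices end closed; the leading door is never toggled and stays open.
--     doors = [1] * (n + 1)
--     k = 1
--     while k * k <= n:
--         doors[k * k] = 0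
--         k += 1
--     return doors
-- ===== Notes on version B (the rewrite author's own statement) =====
-- stated objective: faster
-- what changed: Replaces the nested toggle loops (one pass per door number) by the closed-form fact that a door is toggled once per divisor, so exactly the perfect-square doors end closed: fill the list with open doors and close the square indices.
import Mathlib
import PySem

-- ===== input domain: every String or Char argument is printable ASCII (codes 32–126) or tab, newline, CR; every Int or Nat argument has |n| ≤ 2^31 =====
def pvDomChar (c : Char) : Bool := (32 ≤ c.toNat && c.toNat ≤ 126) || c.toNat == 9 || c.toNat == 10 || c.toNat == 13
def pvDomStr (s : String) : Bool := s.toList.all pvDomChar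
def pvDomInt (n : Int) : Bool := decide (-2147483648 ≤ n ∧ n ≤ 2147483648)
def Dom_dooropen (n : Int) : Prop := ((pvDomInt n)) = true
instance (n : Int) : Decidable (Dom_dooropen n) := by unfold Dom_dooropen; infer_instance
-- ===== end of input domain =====

-- B replaces A's nested toggle loops by the divisor-parity closed form: every door is toggled
-- once per divisor of its number, so exactly the perfect-square doors end closed (0); B fills
-- with 1 and zeroes the square indices.

-- ===== PORT A =====
def dooropen (n : Int) : List Int :=
  let doors : List Int := (PySem.List.pyRange 0 (n+1) 1).foldl (fun d _ => d ++ [(1 : Int)]) []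
  (PySem.List.pyRange 1 (n+1) 1).foldl
    (fun d i =>
      (PySem.List.pyRange i (n+1) i).foldl
        (fun d2 j => PySem.List.pySetD d2 j (1 - PySem.List.pyGetD d2 j 0)) d)
    doors

-- ===== PORT B =====
-- the 'while k*k <= n' loop of Source B; the fuel argument only makes the recursion structural
def dooropenAltLoop : Nat → Int → Int → List Int → List Int
  | 0, _, _, doors => doors
  | fuel+1, n, k, doors =>
    if k * k ≤ n then dooropenAltLoop fuel n (k+1) (PySem.List.pySetD doors (k*k) 0)
    else doors

def dooropen_alt (n : Int) : List Int :=
  dooropenAltLoop (n.toNat + 1) n 1 (List.replicate (n+1).toNat 1)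

-- ===== PRECONDITION & SPEC =====
def Spec_dooropen (n : Int) (out : List Int) : Prop := out = dooropen_alt n
instance (n : Int) (out : List Int) : Decidable (Spec_dooropen n out) := by unfold Spec_dooropen; infer_instance

-- ===== CLAIM (what is proved, stated in full; the proofs are below) =====
def Claim_equal_dooropen : Prop := ∀ (n : Int), Dom_dooropen n → Spec_dooropen n (dooropen n)

-- ===== LEMMAS AND PROOFS =====

-- the toggle step of A's inner loop
def tg (d : List Int) (j : Int) : List Int :=
  PySem.List.pySetD d j (1 - PySem.List.pyGetD d j 0)

-- all toggles of A, flattened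
def togglesA (n : Int) : List Int :=
  (PySem.List.pyRange 1 (n+1) 1).flatMap (fun i => PySem.List.pyRange i (n+1) i)

theorem isSquare_iff_even_factorization {m : ℕ} (hm : m ≠ 0) :
    IsSquare m ↔ ∀ p, Even (m.factorization p) := by
  constructor
  · rintro ⟨r, rfl⟩ p
    have hr : r ≠ 0 := by rintro rfl; simp at hm
    rw [Nat.factorization_mul hr hr]
    exact ⟨r.factorization p, by simp⟩
  · intro h
    refine ⟨m.factorization.prod fun p k => p ^ (k / 2), ?_⟩
    conv_lhs => rw [← Nat.prod_factorization_pow_eq_self hm]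
    rw [← Finsupp.prod_mul]
    refine Finsupp.prod_congr fun p hp => ?_
    rw [← pow_add]
    congr 1
    obtain ⟨c, hc⟩ := h p
    omega

theorem odd_prod_nat {f : ℕ → ℕ} {s : Finset ℕ} :
    Odd (∏ i ∈ s, f i) ↔ ∀ i ∈ s, Odd (f i) := by
  induction s using Finset.cons_induction with
  | empty => simp
  | cons a s ha ih =>
    rw [Finset.prod_cons, Nat.odd_mul, ih]
    simp

theorem odd_card_divisors_iff {m : ℕ} (hm : m ≠ 0) :
    Odd m.divisors.card ↔ IsSquare m := by
  rw [Nat.card_divisors hm, isSquare_iff_even_factorization hm, odd_prod_nat]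
  constructor
  · intro h p
    by_cases hp : p ∈ m.primeFactors
    · have := h p hp
      rw [Nat.odd_add_one] at this
      exact Nat.not_odd_iff_even.mp this
    · rw [← Nat.support_factorization] at hp
      simp [Finsupp.notMem_support_iff.mp hp]
  · intro h p _
    rw [Nat.odd_add_one]
    exact Nat.not_odd_iff_even.mpr (h p)

theorem tg_length (ts : List Int) (d : List Int) :
    (ts.foldl tg d).length = d.length := by
  induction ts generalizing d with
  | nil => rfl
  | cons j rest ih => simp [List.foldl_cons, ih, tg, PySem.List.length_pySetD]

theorem tg_getD : ∀ (ts : List Int) (d : List Int) (m : Nat), m < d.length →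
    (∀ j ∈ ts, 0 ≤ j ∧ j < (d.length : Int)) →
    (ts.foldl tg d).getD m 0 =
      if Even (ts.count (m : Int)) then d.getD m 0 else 1 - d.getD m 0 := by
  intro ts
  induction ts with
  | nil => intro d m hm hts; simp
  | cons j rest ih =>
    intro d m hm hts
    obtain ⟨hj0, hjlen⟩ := hts j (by simp)
    have hjt : j.toNat < d.length := by omega
    have hg : PySem.List.pyGetD d j 0 = d.getD j.toNat 0 := by
      rw [PySem.List.pyGetD_eq_getElem d 0 hj0 hjlen, List.getD_eq_getElem d 0 hjt]
    have hstep : List.foldl tg d (j :: rest) =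
        List.foldl tg (d.set j.toNat (1 - d.getD j.toNat 0)) rest := by
      rw [List.foldl_cons]
      congr 1
      rw [tg, PySem.List.pySetD_of_nonneg d _ hj0, hg]
    rw [hstep]
    set d' := d.set j.toNat (1 - d.getD j.toNat 0) with hd'
    have hlen' : d'.length = d.length := by simp [hd']
    rw [ih d' m (by omega)
      (fun x hx => by rw [hlen']; exact hts x (List.mem_cons_of_mem _ hx))]
    have hcount : (j :: rest).count (m : Int) =
        rest.count (m : Int) + if j = (m : Int) then 1 else 0 := by
      simp [List.count_cons]
    have hpar : ∀ c : ℕ, Even (c + 1) ↔ ¬ Even c := by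
      intro c; simp [Nat.even_add_one]
    by_cases hjm : j = (m : Int)
    · have hjmn : j.toNat = m := by omega
      have hdm : d'.getD m 0 = 1 - d.getD m 0 := by
        rw [hd', List.getD_eq_getElem?_getD, List.getElem?_set, if_pos hjmn,
            if_pos (by omega)]
        simp [hjmn, List.getD_eq_getElem?_getD]
      rw [hcount, if_pos hjm, hdm]
      by_cases he : Even (rest.count (m : Int))
      · rw [if_pos he, if_neg (by rw [hpar]; exact fun hc => hc he)]
      · rw [if_neg he, if_pos ((hpar _).mpr he)]
        ring
    · have hjmn : j.toNat ≠ m := by omega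
      have hdm : d'.getD m 0 = d.getD m 0 := by
        rw [hd', List.getD_eq_getElem?_getD, List.getElem?_set, if_neg hjmn,
            ← List.getD_eq_getElem?_getD]
      rw [hcount, if_neg hjm, hdm]
      simp

theorem dooropen_eq_foldl (n : Int) :
    dooropen n = (togglesA n).foldl tg (List.replicate (n+1).toNat 1) := by
  rw [togglesA, List.foldl_flatMap]
  simp only [dooropen]
  rw [PySem.List.foldl_append_singleton_eq_map (fun _ => (1 : Int)), List.nil_append,
      List.map_const', PySem.List.length_pyRange_one]
  norm_num
  rfl

theorem togglesA_bound (n : Int) : ∀ j ∈ togglesA n, 1 ≤ j ∧ j ≤ n := by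
  intro j hj
  rw [togglesA, List.mem_flatMap] at hj
  obtain ⟨i, hi, hji⟩ := hj
  rw [PySem.List.mem_pyRange_one] at hi
  rw [PySem.List.mem_pyRange_iff_of_pos (by omega)] at hji
  obtain ⟨h1, h2, -⟩ := hji
  omega

theorem nodup_pyRange_pos (a b s : Int) (hs : 0 < s) :
    (PySem.List.pyRange a b s).Nodup := by
  rw [PySem.List.pyRange_of_pos a b hs]
  refine List.Nodup.map ?_ List.nodup_range
  intro x y hxy
  have h1 : s * (x : Int) = s * y := by linarith
  have h2 := mul_left_cancel₀ (by omega : (s : Int) ≠ 0) h1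
  exact_mod_cast h2

theorem count_pyRange_pos (a b s x : Int) (hs : 0 < s) :
    (PySem.List.pyRange a b s).count x =
      if x ∈ PySem.List.pyRange a b s then 1 else 0 := by
  split_ifs with h
  · exact le_antisymm (List.nodup_iff_count_le_one.mp (nodup_pyRange_pos a b s hs) x)
      (List.count_pos_iff.mpr h)
  · exact List.count_eq_zero.mpr h

theorem sum_map_ite_one_zero_nat {α : Type} (l : List α) (p : α → Prop) [DecidablePred p] :
    (l.map (fun x => if p x then (1 : ℕ) else 0)).sum = l.countP (fun x => decide (p x)) := by
  induction l with
  | nil => rfl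
  | cons x l ih => by_cases h : p x <;> simp [ih, h, Nat.add_comm]

theorem countP_range_eq_card (t : ℕ) (p : ℕ → Prop) [DecidablePred p] :
    (List.range t).countP (fun k => decide (p k)) = ((Finset.range t).filter p).card := by
  induction t with
  | zero => rfl
  | succ t ih =>
    rw [List.range_succ, List.countP_append, Finset.range_add_one, Finset.filter_insert]
    by_cases h : p t
    · rw [if_pos h, Finset.card_insert_of_notMem (by simp)]
      simp [ih, h]
    · rw [if_neg h]
      simp [ih, h]

theorem count_togglesA (n : Int) (m : Nat) (h1 : 1 ≤ m) (hm : (m : Int) ≤ n) :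
    (togglesA n).count (m : Int) = m.divisors.card := by
  rw [togglesA, List.count_flatMap]
  have hstep : ∀ i ∈ PySem.List.pyRange 1 (n+1) 1,
      (List.count (m : Int) ∘ fun i => PySem.List.pyRange i (n+1) i) i
        = if (i ∣ (m : Int) ∧ i ≤ (m : Int)) then 1 else 0 := by
    intro i hi
    rw [PySem.List.mem_pyRange_one] at hi
    have hipos : (0 : Int) < i := by omega
    simp only [Function.comp]
    rw [count_pyRange_pos _ _ _ _ hipos]
    by_cases h : i ∣ (m : Int) ∧ i ≤ (m : Int)
    · rw [if_pos ((PySem.List.mem_pyRange_iff_of_pos hipos _).mpr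
        ⟨h.2, by omega, dvd_sub h.1 dvd_rfl⟩), if_pos h]
    · rw [if_neg ?_, if_neg h]
      intro hmem
      rw [PySem.List.mem_pyRange_iff_of_pos hipos] at hmem
      obtain ⟨ha, hb, hc⟩ := hmem
      exact h ⟨by have := dvd_add hc dvd_rfl; simpa using this, ha⟩
  rw [List.map_congr_left hstep, sum_map_ite_one_zero_nat, PySem.List.pyRange_one,
      List.countP_map]
  have ht : ((n : Int) + 1 - 1).toNat = n.toNat := by omega
  rw [ht]
  have hpred : ∀ k : ℕ, ((1 : Int) + (k : Int) ∣ (m : Int) ∧ (1 : Int) + (k : Int) ≤ (m : Int))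
      ↔ ((k + 1) ∣ m ∧ k + 1 ≤ m) := by
    intro k
    have hcast : (1 : Int) + (k : Int) = ((k + 1 : ℕ) : Int) := by push_cast; ring
    rw [hcast, Int.natCast_dvd_natCast, Nat.cast_le]
  rw [show ((fun i => decide (i ∣ (m : Int) ∧ i ≤ (m : Int))) ∘ (fun k : ℕ => (1 : Int) + ↑k))
      = (fun k : ℕ => decide ((k + 1) ∣ m ∧ k + 1 ≤ m)) from
    funext fun k => by simp only [Function.comp]; simp [hpred k]]
  rw [countP_range_eq_card]
  have hmn : m ≤ n.toNat := by omega
  refine Finset.card_bij' (fun k _ => k + 1) (fun d _ => d - 1) ?_ ?_ ?_ ?_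
  · intro k hk
    rw [Finset.mem_filter] at hk
    exact Nat.mem_divisors.mpr ⟨hk.2.1, by omega⟩
  · intro d hd
    rw [Nat.mem_divisors] at hd
    have hd1 : 1 ≤ d := by
      rcases Nat.eq_zero_or_pos d with rfl | h
      · exact absurd (Nat.eq_zero_of_zero_dvd hd.1) hd.2
      · exact h
    have hdm : d ≤ m := Nat.le_of_dvd (by omega) hd.1
    rw [Finset.mem_filter, Finset.mem_range]
    refine ⟨show d - 1 < n.toNat by omega, ?_, show d - 1 + 1 ≤ m by omega⟩
    show d - 1 + 1 ∣ m
    rw [Nat.sub_add_cancel hd1]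
    exact hd.1
  · intro k hk
    show k + 1 - 1 = k
    omega
  · intro d hd
    rw [Nat.mem_divisors] at hd
    have hd1 : 1 ≤ d := by
      rcases Nat.eq_zero_or_pos d with rfl | h
      · exact absurd (Nat.eq_zero_of_zero_dvd hd.1) hd.2
      · exact h
    show d - 1 + 1 = d
    omega

theorem count_togglesA_zero (n : Int) : (togglesA n).count (0 : Int) = 0 := by
  rw [List.count_eq_zero]
  intro h
  have := togglesA_bound n 0 h
  omega

theorem altLoop_length (f : Nat) (n k : Int) (d : List Int) :
    (dooropenAltLoop f n k d).length = d.length := by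
  induction f generalizing k d with
  | zero => rfl
  | succ f ih =>
    simp only [dooropenAltLoop]
    split
    · rw [ih, PySem.List.length_pySetD]
    · rfl

theorem altLoop_getD : ∀ (f : Nat) (n k : Int) (d : List Int), 1 ≤ k →
    n.toNat + 1 ≤ f + k.toNat → ∀ (m : Nat), m < d.length →
    ((∃ t : Int, k ≤ t ∧ t * t ≤ n ∧ t * t = (m : Int)) →
      (dooropenAltLoop f n k d).getD m 0 = 0) ∧
    (¬(∃ t : Int, k ≤ t ∧ t * t ≤ n ∧ t * t = (m : Int)) →
      (dooropenAltLoop f n k d).getD m 0 = d.getD m 0) := by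
  intro f
  induction f with
  | zero =>
    intro n k d hk hf m hm
    constructor
    · rintro ⟨t, hkt, htn, -⟩
      exfalso
      have ht1 : (1 : Int) ≤ t := le_trans hk hkt
      have htt : t ≤ t * t := le_mul_of_one_le_left (by omega) ht1
      have hkn : n + 1 ≤ k := by omega
      linarith
    · intro _; rfl
  | succ f ih =>
    intro n k d hk hf m hm
    simp only [dooropenAltLoop]
    by_cases h : k * k ≤ n
    · rw [if_pos h]
      have hkk0 : (0 : Int) ≤ k * k := mul_nonneg (by omega) (by omega)
      have hset : PySem.List.pySetD d (k * k) 0 = d.set (k * k).toNat 0 :=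
        PySem.List.pySetD_of_nonneg d 0 hkk0
      rw [hset]
      have ih' := ih n (k + 1) (d.set (k * k).toNat 0) (by omega) (by omega) m (by simpa using hm)
      have hdm : (d.set (k * k).toNat 0).getD m 0 =
          if (k * k).toNat = m then 0 else d.getD m 0 := by
        rw [List.getD_eq_getElem?_getD, List.getElem?_set]
        by_cases hc : (k * k).toNat = m
        · rw [if_pos hc, if_pos hc, if_pos (by omega)]
          rfl
        · rw [if_neg hc, if_neg hc, ← List.getD_eq_getElem?_getD]
      constructor
      · rintro ⟨t, htk, htn, htm⟩
        rcases eq_or_lt_of_le htk with rfl | hlt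
        · by_cases hex : ∃ t : Int, k + 1 ≤ t ∧ t * t ≤ n ∧ t * t = (m : Int)
          · exact ih'.1 hex
          · rw [ih'.2 hex, hdm, if_pos (by rw [htm]; simp)]
        · exact ih'.1 ⟨t, by omega, htn, htm⟩
      · intro hnex
        have hex' : ¬∃ t : Int, k + 1 ≤ t ∧ t * t ≤ n ∧ t * t = (m : Int) := by
          rintro ⟨t, ht1, ht2, ht3⟩
          exact hnex ⟨t, by omega, ht2, ht3⟩
        rw [ih'.2 hex', hdm, if_neg ?_]
        intro hc
        apply hnex
        refine ⟨k, le_refl k, h, ?_⟩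
        have h2 := Int.toNat_of_nonneg hkk0
        omega
    · rw [if_neg h]
      constructor
      · rintro ⟨t, htk, htn, -⟩
        exfalso
        have hkt2 : k * k ≤ t * t := mul_le_mul htk htk (by omega) (by omega)
        linarith
      · intro _; rfl

-- ===== VERDICT (by name: the statement is the Claim_ definition above) =====
theorem dooropen_spec : Claim_equal_dooropen := by
  intro n _
  unfold Spec_dooropen dooropen_alt
  rw [dooropen_eq_foldl]
  apply List.ext_getElem
  · rw [tg_length, altLoop_length]
  · intro m h1 h2
    have hm : m < ((n : Int) + 1).toNat := by
      rw [tg_length] at h1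
      simpa using h1
    rw [← List.getD_eq_getElem _ 0 h1, ← List.getD_eq_getElem _ 0 h2]
    have hrep : (List.replicate ((n + 1 : Int)).toNat (1 : Int)).getD m 0 = 1 :=
      List.getD_replicate _ hm
    have hA := tg_getD (togglesA n) (List.replicate ((n + 1 : Int)).toNat 1) m
      (by simpa using hm)
      (fun j hj => by
        have hb := togglesA_bound n j hj
        refine ⟨by omega, ?_⟩
        simp only [List.length_replicate]
        omega)
    have hB := altLoop_getD (n.toNat + 1) n 1 (List.replicate ((n + 1 : Int)).toNat 1)
      le_rfl (by omega) m (by simpa using hm)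
    rw [hA, hrep]
    by_cases hsq : ∃ t : Int, 1 ≤ t ∧ t * t ≤ n ∧ t * t = (m : Int)
    · rw [hB.1 hsq]
      obtain ⟨t, ht1, htn, htm⟩ := hsq
      have hmpos : 1 ≤ m := by
        have h11 : (1 : Int) ≤ t * t := by nlinarith
        omega
      have hmn : (m : Int) ≤ n := htm ▸ htn
      rw [count_togglesA n m hmpos hmn, if_neg ?_]
      · norm_num
      · intro heven
        have hodd : Odd m.divisors.card := by
          rw [odd_card_divisors_iff (by omega)]
          refine ⟨t.toNat, ?_⟩
          have ht0 : (0 : Int) ≤ t := by omega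
          have hc : ((t.toNat * t.toNat : ℕ) : Int) = ((m : ℕ) : Int) := by
            push_cast [Int.toNat_of_nonneg ht0]
            exact htm
          exact_mod_cast hc.symm
        exact (Nat.not_even_iff_odd.mpr hodd) heven
    · rw [hB.2 hsq, hrep, if_pos ?_]
      by_cases hm0 : m = 0
      · subst hm0
        rw [Nat.cast_zero, count_togglesA_zero]
        exact ⟨0, rfl⟩
      · have hmn : (m : Int) ≤ n := by omega
        rw [count_togglesA n m (by omega) hmn]
        by_contra hodd'
        have hodd : Odd m.divisors.card := Nat.not_even_iff_odd.mp hodd'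
        obtain ⟨r, hr⟩ := (odd_card_divisors_iff (by omega) |>.mp hodd)
        have hr1 : 1 ≤ r := by
          rcases Nat.eq_zero_or_pos r with rfl | h
          · omega
          · exact h
        refine absurd ?_ hsq
        refine ⟨(r : Int), by exact_mod_cast hr1, ?_, ?_⟩
        · rw [← Nat.cast_mul, ← hr]
          exact hmn
        · rw [← Nat.cast_mul, ← hr]
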